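-- pv_equiv track=rewrite | github.com/MaxShulha94/test_task_2023 | main.py | next_sequence_elements
-- ===== SOURCE A (Python) =====
-- def next_sequence_elements(sequence):
--     count = 0  # Створив змінну для прорахунку ітерацій
--     next_elements = []  # Створив список в якому будуть додаватись 3 наступні елементи секвенції
--     elem1 = sequence[-2]  # Створив змінну з передостаннім елементом секвенції
--     elem2 = sequence[-1]  # Створив змінну з останнім елементом секвенції
--     diff = elem2 - elem1  # Отримав різницю двох елементів
--     diffs = [sequence[i + 1] - sequence[i] for i in range(len(sequence) - 1)]  # Створив список в з різниць елементів
--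
--     if elem1 and elem2 == sequence[0] and diff == 0:  # Варіант коли елементи секвенції однакові
--         return [elem1] * 3
--
--     if diff != 0 and diffs[0] == diffs[-1]:  # Варіант коли елементи секвенції мають сталу змінну
--         while count < 3:
--             elem1, elem2 = elem2, elem2 + diff
--             next_elements.append(elem2)
--             count += 1
--         return next_elements
--     else:  # Варіант коли елементи секвенції мають різницю що змінюється
--         second_diffs = [diffs[i + 1] - diffs[i] for i in range(len(diffs) - 1)]
--         while count < 3:
--             elem1, elem2 = elem2, elem2 + diffs[-1] + second_diffs[-1]
--             diffs.append(elem2 - elem1)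
--             next_elements.append(elem2)
--             count += 1
--         return next_elements
-- ===== SOURCE B (Python) =====
-- def next_sequence_elements(sequence):
--     first = sequence[0]
--     e1, e2 = sequence[-2], sequence[-1]
--     d = e2 - e1
--     if e1 and e2 == first and d == 0:
--         return [e1, e1, e1]
--     if d != 0 and sequence[1] - first == d:
--         return [e2 + d, e2 + 2 * d, e2 + 3 * d]
--     d2 = d - (e1 - sequence[-3])
--     return [e2 + d + d2, e2 + 2 * d + 3 * d2, e2 + 3 * d + 6 * d2]
-- ===== Notes on version B (the rewrite author's own statement) =====
-- stated objective: faster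
-- what changed: B replaces A's O(n) construction of the full first- and second-difference lists and its unrolled while-loops by a closed form computed from the five endpoint values sequence[0], sequence[1], sequence[-3], sequence[-2], sequence[-1] only.
import Mathlib
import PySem

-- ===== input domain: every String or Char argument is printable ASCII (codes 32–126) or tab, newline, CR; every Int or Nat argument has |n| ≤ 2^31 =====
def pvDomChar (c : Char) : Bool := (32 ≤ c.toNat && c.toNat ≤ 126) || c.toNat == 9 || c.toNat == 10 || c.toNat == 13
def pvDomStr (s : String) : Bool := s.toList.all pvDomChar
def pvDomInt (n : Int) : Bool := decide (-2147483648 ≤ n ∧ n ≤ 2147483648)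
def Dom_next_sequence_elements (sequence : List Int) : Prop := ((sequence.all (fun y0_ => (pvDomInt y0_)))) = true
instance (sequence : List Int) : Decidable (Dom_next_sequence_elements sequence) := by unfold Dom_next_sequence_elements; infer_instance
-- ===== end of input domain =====

-- B replaces A's full first/second difference lists and unrolled loops by a closed form
-- read off the sequence endpoints (O(1) vs O(n)); equivalence proved on Pre_ (len ≥ 2, ≠ [0,0]).


-- ===== PORT A =====
-- Literal port of A: builds the full diffs / second_diffs lists and runs the two
-- 3-iteration while-loops as folds over the same state (elem1, elem2, [diffs,] next_elements).
def next_sequence_elements (sequence : List Int) : List Int :=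
  let elem1 := (PySem.List.pyGet? sequence (-2)).getD 0
  let elem2 := (PySem.List.pyGet? sequence (-1)).getD 0
  let diff := elem2 - elem1
  let diffs := (PySem.List.pyRange 0 (PySem.List.len sequence - 1) 1).map
    (fun i => PySem.List.pyGetD sequence (i + 1) 0 - PySem.List.pyGetD sequence i 0)
  if elem1 ≠ 0 ∧ elem2 = PySem.List.pyGetD sequence 0 0 ∧ diff = 0 then
    List.replicate 3 elem1
  else if diff ≠ 0 ∧ PySem.List.pyGetD diffs 0 0 = PySem.List.pyGetD diffs (-1) 0 then
    (((List.range 3).foldl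
      (fun (st : Int × Int × List Int) _ =>
        (st.2.1, st.2.1 + diff, st.2.2 ++ [st.2.1 + diff]))
      (elem1, elem2, []))).2.2
  else
    let second_diffs := (PySem.List.pyRange 0 (PySem.List.len diffs - 1) 1).map
      (fun i => PySem.List.pyGetD diffs (i + 1) 0 - PySem.List.pyGetD diffs i 0)
    (((List.range 3).foldl
      (fun (st : Int × Int × List Int × List Int) _ =>
        let newE := st.2.1 + PySem.List.pyGetD st.2.2.1 (-1) 0 + PySem.List.pyGetD second_diffs (-1) 0
        (st.2.1, newE, st.2.2.1 ++ [newE - st.2.1], st.2.2.2 ++ [newE]))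
      (elem1, elem2, diffs, []))).2.2.2

-- ===== PORT B =====
-- Port of B (Source B): closed form from the endpoints only.
def next_sequence_elements_alt (sequence : List Int) : List Int :=
  let first := (PySem.List.pyGet? sequence 0).getD 0
  let e1 := (PySem.List.pyGet? sequence (-2)).getD 0
  let e2 := (PySem.List.pyGet? sequence (-1)).getD 0
  let d := e2 - e1
  if e1 ≠ 0 ∧ e2 = first ∧ d = 0 then
    [e1, e1, e1]
  else if d ≠ 0 ∧ (PySem.List.pyGet? sequence 1).getD 0 - first = d then
    [e2 + d, e2 + 2 * d, e2 + 3 * d]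
  else
    let d2 := d - (e1 - (PySem.List.pyGet? sequence (-3)).getD 0)
    [e2 + d + d2, e2 + 2 * d + 3 * d2, e2 + 3 * d + 6 * d2]

-- ===== PRECONDITION & SPEC =====
-- A raises IndexError when len < 2 (sequence[-2]) and on [0, 0] (empty second_diffs
-- in the quadratic branch); exactly those inputs are excluded.
def Pre_next_sequence_elements (sequence : List Int) : Prop :=
  2 ≤ sequence.length ∧ sequence ≠ [0, 0]
instance (sequence : List Int) : Decidable (Pre_next_sequence_elements sequence) := by
  unfold Pre_next_sequence_elements; infer_instance

def pvWitness_next_sequence_elements : List Int := [1, 2, 3]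

def Spec_next_sequence_elements (sequence : List Int) (out : List Int) : Prop := out = next_sequence_elements_alt sequence
instance (sequence : List Int) (out : List Int) : Decidable (Spec_next_sequence_elements sequence out) := by unfold Spec_next_sequence_elements; infer_instance

-- ===== CLAIM (what is proved, stated in full; the proofs are below) =====
def Claim_equal_next_sequence_elements : Prop := ∀ (sequence : List Int), Dom_next_sequence_elements sequence → Pre_next_sequence_elements sequence → Spec_next_sequence_elements sequence (next_sequence_elements sequence)

-- ===== LEMMAS AND PROOFS =====

theorem next_sequence_elements_equal (sequence : List Int)
    (hpre : Pre_next_sequence_elements sequence) :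
    next_sequence_elements sequence = next_sequence_elements_alt sequence := by
  obtain ⟨h2, hne⟩ := hpre
  unfold next_sequence_elements next_sequence_elements_alt
  have hg2 : (PySem.List.pyGet? sequence (-2)).getD 0 = sequence.getD (sequence.length - 2) 0 := by
    rw [PySem.List.pyGet?_neg_ofNat sequence 2 (by omega) (by omega)]
    rcases h : sequence[sequence.length-2]? with _|v <;> simp [List.getD, h]
  have hg1 : (PySem.List.pyGet? sequence (-1)).getD 0 = sequence.getD (sequence.length - 1) 0 := by
    rw [PySem.List.pyGet?_neg_ofNat sequence 1 (by omega) (by omega)]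
    rcases h : sequence[sequence.length-1]? with _|v <;> simp [List.getD, h]
  have hg0 : (PySem.List.pyGet? sequence 0).getD 0 = sequence.getD 0 0 := by
    rw [PySem.List.pyGet?_zero]; rcases h : sequence[0]? with _|v <;> simp [List.getD, h]
  have hgD0 : PySem.List.pyGetD sequence 0 0 = sequence.getD 0 0 := by
    simpa using PySem.List.pyGetD_natCast (xs := sequence) (n := 0) (d := (0:Int))
  have hB1 : (PySem.List.pyGet? sequence 1).getD 0 = sequence.getD 1 0 := by
    rw [show (1:Int) = ((1:Nat):Int) from rfl, PySem.List.pyGet?_natCast]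
    simp [List.getD, List.getElem?_eq_getElem (show 1 < sequence.length by omega)]
  simp only [hg2, hg1, hg0, hgD0, hB1, PySem.List.len_eq]
  set N := sequence.length with hN
  set D := List.map (fun i => PySem.List.pyGetD sequence (i + 1) 0 - PySem.List.pyGetD sequence i 0)
      (PySem.List.pyRange 0 (↑N - 1) 1) with hDdef
  have hDk : ∀ k : Nat, k < N - 1 → PySem.List.pyGetD D (↑k) 0 = sequence.getD (k+1) 0 - sequence.getD k 0 := by
    intro k hk
    rw [hDdef, PySem.List.pyGetD_map_pyRange_of_nonneg _ _ _ _ (by positivity) (by omega)]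
    have : ((k:Int) + 1) = ((k+1 : Nat) : Int) := by push_cast; ring
    rw [this, PySem.List.pyGetD_natCast, PySem.List.pyGetD_natCast]
  have hDlen : D.length = N - 1 := by
    rw [hDdef]; simp [PySem.List.length_pyRange_one]
  have hD0 : PySem.List.pyGetD D 0 0 = sequence.getD 1 0 - sequence.getD 0 0 := by
    have := hDk 0 (by omega); simpa using this
  have hDlast : PySem.List.pyGetD D (-1) 0 = sequence.getD (N-1) 0 - sequence.getD (N-2) 0 := by
    rw [PySem.List.pyGetD_neg_ofNat D 1 0 (by omega) (by omega)]
    have h := hDk (N-2) (by omega)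
    rw [PySem.List.pyGetD_natCast, List.getD_eq_getElem _ _ (by omega)] at h
    have hi : D.length - 1 = N - 2 := by omega
    have hi2 : N - 2 + 1 = N - 1 := by omega
    simp only [hi]
    rw [h, hi2]
  simp only [hD0, hDlast, hDlen]
  split_ifs with hc1 hc2
  · rfl
  · simp only [show List.range 3 = [0,1,2] from rfl, List.foldl]
    norm_num
    and_intros <;> ring
  · -- quadratic branch: N = 2 is impossible here
    have h3 : 3 ≤ N := by
      by_contra hlt
      have hN2 : N = 2 := by omega
      have hlen2 : sequence.length = 2 := by omega
      obtain ⟨x, y, hxy⟩ := List.length_eq_two.mp hlen2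
      have hx0 : sequence.getD 0 0 = x := by rw [hxy]; rfl
      have hx1 : sequence.getD 1 0 = y := by rw [hxy]; rfl
      have hA2 : sequence.getD (N-2) 0 = x := by rw [show N - 2 = 0 from by omega, hx0]
      have hB2 : sequence.getD (N-1) 0 = y := by rw [show N - 1 = 1 from by omega, hx1]
      simp only [hA2, hB2, hx0, hx1] at hc1 hc2
      have hd0 : y - x = 0 := by by_contra hd; exact hc2 ⟨hd, by simp⟩
      have hx : x = 0 := by by_contra hx; exact hc1 ⟨hx, by omega, by omega⟩
      exact hne (by rw [hxy, hx, show y = (0:Int) from by omega])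
    set SD := List.map (fun i => PySem.List.pyGetD D (i + 1) 0 - PySem.List.pyGetD D i 0)
        (PySem.List.pyRange 0 (↑(N - 1) - 1) 1) with hSDdef
    have hSDlen : SD.length = N - 2 := by
      rw [hSDdef]; simp [PySem.List.length_pyRange_one]; omega
    have hSDk : ∀ k : Nat, k < N - 2 → PySem.List.pyGetD SD (↑k) 0 =
        (sequence.getD (k+2) 0 - sequence.getD (k+1) 0) - (sequence.getD (k+1) 0 - sequence.getD k 0) := by
      intro k hk
      rw [hSDdef, PySem.List.pyGetD_map_pyRange_of_nonneg _ _ _ _ (by positivity) (by omega)]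
      have e1 : ((k:Int) + 1) = ((k+1 : Nat) : Int) := by push_cast; ring
      rw [e1, hDk (k+1) (by omega), hDk k (by omega)]
    have hSDlast : PySem.List.pyGetD SD (-1) 0 =
        (sequence.getD (N-1) 0 - sequence.getD (N-2) 0) - (sequence.getD (N-2) 0 - sequence.getD (N-3) 0) := by
      rw [PySem.List.pyGetD_neg_ofNat SD 1 0 (by omega) (by omega)]
      have h := hSDk (N-3) (by omega)
      rw [PySem.List.pyGetD_natCast, List.getD_eq_getElem _ _ (by omega)] at h
      have hi : SD.length - 1 = N - 3 := by omega
      have e1 : N - 3 + 2 = N - 1 := by omega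
      have e2 : N - 3 + 1 = N - 2 := by omega
      simp only [hi]
      rw [h, e1, e2]
    have hB3 : (PySem.List.pyGet? sequence (-3)).getD 0 = sequence.getD (N-3) 0 := by
      rw [PySem.List.pyGet?_neg_ofNat sequence 3 (by omega) (by omega)]
      rcases h : sequence[sequence.length-3]? with _|v <;> simp [List.getD, h, hN]
    simp only [show List.range 3 = [0,1,2] from rfl, List.foldl, hSDlast, hDlast, hB3,
      PySem.List.pyGetD_neg_one_append_singleton]
    norm_num
    and_intros <;> ring

-- ===== VERDICT (by name: the statement is the Claim_ definition above) =====
theorem next_sequence_elements_spec : Claim_equal_next_sequence_elements := by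
  intro sequence _ hpre
  exact next_sequence_elements_equal sequence hpre
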